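-- pv_equiv track=rewrite | github.com/Brygghuset/CNN-LSTM-LSTM-training-v5 | tests/integration_tests/test_t072_t075_t077_t078_t079_aws_multi_instance.py | verify_no_case_overlap
-- ===== SOURCE A (Python) =====
-- def verify_no_case_overlap(all_instances_cases):
--     """Verifiera att ingen case overlap finns mellan instanser"""
--     all_cases = set()
--     overlaps = []
--
--     for instance_host, cases in all_instances_cases.items():
--         instance_cases = set(cases)
--         overlap = all_cases & instance_cases
--         if overlap:
--             overlaps.append((instance_host, overlap))
--         all_cases.update(instance_cases)
--
--     return overlaps, all_cases
-- ===== SOURCE B (Python) =====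
-- def verify_no_case_overlap(all_instances_cases):
--     """Verifiera att ingen case overlap finns mellan instanser"""
--     # Pass 1: index each case by the earliest instance that contains it.
--     first_seen = {}
--     for i, cases in enumerate(all_instances_cases.values()):
--         for c in cases:
--             if c not in first_seen:
--                 first_seen[c] = i
--     # Pass 2: an instance overlaps exactly on its cases first seen earlier.
--     overlaps = []
--     for i, (instance_host, cases) in enumerate(all_instances_cases.items()):
--         instance_cases = set(cases)
--         overlap = {c for c in first_seen if first_seen[c] < i and c in instance_cases}
--         if overlap:
--             overlaps.append((instance_host, overlap))
--     return overlaps, set(first_seen)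
-- ===== Notes on version B (the rewrite author's own statement) =====
-- stated objective: alternative
-- what changed: A's single scan that accumulates a growing all_cases set and intersects it with each instance is replaced by two differently shaped passes: pass 1 builds a first_seen dict (case -> earliest instance index) plus the full case universe, pass 2 rescans with enumerate and reconstructs each instance's overlap as the cases whose first_seen index is smaller than the instance's index.
import Mathlib
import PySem

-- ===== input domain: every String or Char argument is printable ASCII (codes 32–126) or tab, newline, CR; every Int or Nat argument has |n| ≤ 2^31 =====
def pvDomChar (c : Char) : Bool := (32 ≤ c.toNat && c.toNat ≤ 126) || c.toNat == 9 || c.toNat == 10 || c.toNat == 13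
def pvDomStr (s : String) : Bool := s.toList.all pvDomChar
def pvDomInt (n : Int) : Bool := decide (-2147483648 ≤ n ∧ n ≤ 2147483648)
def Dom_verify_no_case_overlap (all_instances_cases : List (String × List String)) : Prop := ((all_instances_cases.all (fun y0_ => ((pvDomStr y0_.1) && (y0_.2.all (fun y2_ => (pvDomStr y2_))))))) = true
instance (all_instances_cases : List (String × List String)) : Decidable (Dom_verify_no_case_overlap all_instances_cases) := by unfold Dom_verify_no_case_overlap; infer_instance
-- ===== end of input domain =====

-- B replaces A's single accumulating scan by two differently shaped passes: build a first-seen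
-- index dict once, then rescan with enumerate, recovering each overlap by filtering the index
-- (objective: alternative decomposition; not faster — pass 2 rescans the whole index per instance).

-- ===== PORT A =====
-- one fold carrying (all_cases, overlaps), exactly A's loop
def verify_no_case_overlap (all_instances_cases : List (String × List String)) : (List (String × List String)) × List String :=
  let st := all_instances_cases.foldl
    (fun (st : List String × List (String × List String)) p =>
      let instance_cases : PySem.Set String := PySem.Set.ofList p.2
      let overlap := PySem.Set.inter st.1 instance_cases
      (PySem.Set.update st.1 instance_cases,
       if overlap = [] then st.2 else st.2 ++ [(p.1, overlap)]))
    ([], [])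
  (st.2, st.1)

-- ===== PORT B =====
-- B pass 1 inner step: record case c at instance index i only if absent ('if c not in first_seen')
def insCase (i : Int) (d : PySem.Dict String Int) (c : String) : PySem.Dict String Int :=
  if d.contains c then d else d.insert c i

-- B pass 1: 'for i, cases in enumerate(values): for c in cases: …', from start index i0 and dict d
def buildFirstSeen (vs : List (List String)) (i0 : Int) (d : PySem.Dict String Int) : PySem.Dict String Int :=
  (PySem.List.enumerate vs i0).foldl (fun d p => p.2.foldl (insCase p.1) d) d

def verify_no_case_overlap_alt (all_instances_cases : List (String × List String)) : (List (String × List String)) × List String :=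
  let first_seen := buildFirstSeen (all_instances_cases.map Prod.snd) 0 PySem.Dict.empty
  -- pass 2: the set comprehension iterates first_seen's (distinct) keys, so it is their filter
  let overlaps := (PySem.List.enumerate all_instances_cases).foldl
    (fun (acc : List (String × List String)) p =>
      let instance_cases : PySem.Set String := PySem.Set.ofList p.2.2
      let overlap := first_seen.keys.filter
        (fun c => decide (first_seen.getD c 0 < p.1) && PySem.Set.contains instance_cases c)
      if overlap = [] then acc else acc ++ [(p.2.1, overlap)])
    []
  (overlaps, PySem.Set.ofList first_seen.keys)

-- ===== PRECONDITION & SPEC =====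
def Spec_verify_no_case_overlap (all_instances_cases : List (String × List String)) (out : (List (String × List String)) × List String) : Prop := out = verify_no_case_overlap_alt all_instances_cases
instance (all_instances_cases : List (String × List String)) (out : (List (String × List String)) × List String) : Decidable (Spec_verify_no_case_overlap all_instances_cases out) := by unfold Spec_verify_no_case_overlap; infer_instance

-- ===== CLAIM (what is proved, stated in full; the proofs are below) =====
def Claim_equal_verify_no_case_overlap : Prop := ∀ (all_instances_cases : List (String × List String)), Dom_verify_no_case_overlap all_instances_cases → Spec_verify_no_case_overlap all_instances_cases (verify_no_case_overlap all_instances_cases)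

-- ===== LEMMAS AND PROOFS =====

-- the cases of a prefix, flattened; seen jn l = A's all_cases after jn instances
def flatCases (l : List (String × List String)) : List String := (l.map Prod.snd).flatten

-- reference recursion: A's overlaps from a given seen-set
def specO (s : PySem.Set String) : List (String × List String) → List (String × List String)
  | [] => []
  | p :: rest =>
    (let ov := PySem.Set.inter s (PySem.Set.ofList p.2)
     if ov = [] then [] else [(p.1, ov)])
    ++ specO (PySem.Set.update s (PySem.Set.ofList p.2)) rest

lemma update_ofList (s : PySem.Set String) (xs : List String) :
    PySem.Set.update s (PySem.Set.ofList xs) = PySem.Set.update s xs := by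
  rw [PySem.Set.update_eq_append_filter, PySem.Set.update_eq_append_filter,
      PySem.Set.ofList_ofList]

-- A's fold, first component
lemma foldA_fst (l : List (String × List String)) (s : PySem.Set String)
    (acc : List (String × List String)) :
    (l.foldl (fun (st : List String × List (String × List String)) p =>
      (PySem.Set.update st.1 (PySem.Set.ofList p.2),
       if PySem.Set.inter st.1 (PySem.Set.ofList p.2) = [] then st.2
       else st.2 ++ [(p.1, PySem.Set.inter st.1 (PySem.Set.ofList p.2))])) (s, acc)).1
    = PySem.Set.update s (flatCases l) := by
  induction l generalizing s acc with
  | nil => simp [flatCases, PySem.Set.update_nil]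
  | cons p rest ih =>
      simp only [List.foldl_cons]
      rw [ih]
      rw [update_ofList]
      simp [flatCases, PySem.Set.update_append]

-- A's fold, second component
lemma foldA_snd (l : List (String × List String)) (s : PySem.Set String)
    (acc : List (String × List String)) :
    (l.foldl (fun (st : List String × List (String × List String)) p =>
      (PySem.Set.update st.1 (PySem.Set.ofList p.2),
       if PySem.Set.inter st.1 (PySem.Set.ofList p.2) = [] then st.2
       else st.2 ++ [(p.1, PySem.Set.inter st.1 (PySem.Set.ofList p.2))])) (s, acc)).2
    = acc ++ specO s l := by
  induction l generalizing s acc with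
  | nil => simp [specO]
  | cons p rest ih =>
      simp only [List.foldl_cons]
      rw [ih, specO]
      split_ifs with h <;> simp [h]

-- inner fold of pass 1: items grow by entries valued i, keys grow by Set.update
lemma inner_items (cs : List String) (d : PySem.Dict String Int) (i : Int)
    (hnd : d.keys.Nodup) :
    ∃ t, (cs.foldl (insCase i) d).items = d.items ++ t ∧ (∀ p ∈ t, p.2 = i) ∧
      (cs.foldl (insCase i) d).keys = PySem.Set.update d.keys cs := by
  induction cs generalizing d with
  | nil => exact ⟨[], by simp [PySem.Set.update_nil]⟩
  | cons c cs ih =>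
      simp only [List.foldl_cons, insCase]
      by_cases h : d.contains c = true
      · rw [if_pos h]
        obtain ⟨t, ht, hv, hk⟩ := ih d hnd
        refine ⟨t, ht, hv, ?_⟩
        rw [hk, PySem.Set.update_cons,
            PySem.Set.add_of_mem ((PySem.Dict.contains_iff_mem_keys d c).mp h)]
      · rw [if_neg h]
        have h' : d.contains c = false := by simpa using h
        have hmem : c ∉ d.keys := fun hc => h ((PySem.Dict.contains_iff_mem_keys d c).mpr hc)
        obtain ⟨t, ht, hv, hk⟩ := ih (d.insert c i) (PySem.Dict.nodup_keys_insert d c i hnd)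
        refine ⟨(c, i) :: t, ?_, ?_, ?_⟩
        · rw [ht, PySem.Dict.items_insert_of_not_contains d i h']
          simp
        · intro p hp
          rcases List.mem_cons.mp hp with hp | hp
          · simp [hp]
          · exact hv p hp
        · rw [hk, PySem.Dict.keys_insert_of_not_contains d i h',
              PySem.Set.update_cons, PySem.Set.add_of_not_mem hmem]

-- pass 1 from start index i0: items grow by entries valued in [i0, i0+|vs|), keys by the flatten
lemma build_items (vs : List (List String)) (i0 : Nat) (d : PySem.Dict String Int)
    (hnd : d.keys.Nodup) :
    ∃ t, (buildFirstSeen vs i0 d).items = d.items ++ t ∧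
      (∀ p ∈ t, (i0 : Int) ≤ p.2 ∧ p.2 < (i0 : Int) + vs.length) ∧
      (buildFirstSeen vs i0 d).keys = PySem.Set.update d.keys vs.flatten := by
  induction vs generalizing i0 d with
  | nil =>
      exact ⟨[], by simp [buildFirstSeen, PySem.List.enumerate_nil, PySem.Set.update_nil]⟩
  | cons v vs ih =>
      simp only [buildFirstSeen, PySem.List.enumerate_cons, List.foldl_cons]
      obtain ⟨t0, ht0, hv0, hk0⟩ := inner_items v d (i0 : Int) hnd
      have hnd1 : (v.foldl (insCase (i0 : Int)) d).keys.Nodup := by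
        rw [hk0]; exact PySem.Set.nodup_update _ _ hnd
      have hcast : ((i0 : Int) + 1) = ((i0 + 1 : Nat) : Int) := by push_cast; ring
      rw [hcast]
      obtain ⟨t1, ht1, hv1, hk1⟩ := ih (i0 + 1) (v.foldl (insCase (i0 : Int)) d) hnd1
      refine ⟨t0 ++ t1, ?_, ?_, ?_⟩
      · rw [show (PySem.List.enumerate vs ((i0 + 1 : Nat) : Int)).foldl
              (fun d p => p.2.foldl (insCase p.1) d) (v.foldl (insCase (i0 : Int)) d)
            = buildFirstSeen vs ((i0 + 1 : Nat) : Int) (v.foldl (insCase (i0 : Int)) d) from rfl,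
            ht1, ht0, List.append_assoc]
      · intro p hp
        rcases List.mem_append.mp hp with hp | hp
        · have := hv0 p hp
          simp only [List.length_cons]
          constructor <;> [omega; (push_cast; omega)]
        · have := hv1 p hp
          simp only [List.length_cons]
          constructor <;> [omega; (push_cast at this ⊢; omega)]
      · rw [show (PySem.List.enumerate vs ((i0 + 1 : Nat) : Int)).foldl
              (fun d p => p.2.foldl (insCase p.1) d) (v.foldl (insCase (i0 : Int)) d)
            = buildFirstSeen vs ((i0 + 1 : Nat) : Int) (v.foldl (insCase (i0 : Int)) d) from rfl,
            hk1, hk0, List.flatten_cons, PySem.Set.update_append]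

-- splitting pass 1 at position jn
lemma build_split (vs : List (List String)) (jn : Nat) (hjn : jn ≤ vs.length) :
    buildFirstSeen vs 0 PySem.Dict.empty
      = buildFirstSeen (vs.drop jn) jn (buildFirstSeen (vs.take jn) 0 PySem.Dict.empty) := by
  conv_lhs => rw [← List.take_append_drop jn vs]
  unfold buildFirstSeen
  rw [PySem.List.enumerate_append, List.foldl_append]
  congr 1
  simp [List.length_take, Nat.min_eq_left hjn]

-- the threshold filter of the full index recovers the prefix's key set
lemma filter_keys (vs : List (List String)) (jn : Nat) (hjn : jn ≤ vs.length) :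
    ((buildFirstSeen vs 0 PySem.Dict.empty).keys.filter
      (fun c => decide ((buildFirstSeen vs 0 PySem.Dict.empty).getD c 0 < (jn : Int))))
    = PySem.Set.ofList (vs.take jn).flatten := by
  obtain ⟨t0, ht0, hv0, hk0⟩ :=
    build_items (vs.take jn) 0 PySem.Dict.empty (by simp [PySem.Dict.keys_empty])
  simp only [Nat.cast_zero] at ht0 hv0 hk0
  have hndP : (buildFirstSeen (vs.take jn) 0 PySem.Dict.empty).keys.Nodup := by
    rw [hk0, PySem.Dict.keys_empty, PySem.Set.update_nil_left]
    exact PySem.Set.nodup_ofList _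
  obtain ⟨t1, ht1, hv1, hk1⟩ :=
    build_items (vs.drop jn) jn (buildFirstSeen (vs.take jn) 0 PySem.Dict.empty) hndP
  rw [build_split vs jn hjn]
  have hndF : (buildFirstSeen (vs.drop jn) jn
      (buildFirstSeen (vs.take jn) 0 PySem.Dict.empty)).keys.Nodup := by
    rw [hk1]
    exact PySem.Set.nodup_update _ _ hndP
  have hkeys : (buildFirstSeen (vs.drop jn) jn
      (buildFirstSeen (vs.take jn) 0 PySem.Dict.empty)).keys
      = (buildFirstSeen (vs.take jn) 0 PySem.Dict.empty).keys ++ t1.map Prod.fst := by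
    show (buildFirstSeen (vs.drop jn) jn
      (buildFirstSeen (vs.take jn) 0 PySem.Dict.empty)).items.map Prod.fst = _
    rw [ht1, List.map_append]
    rfl
  rw [hkeys, List.filter_append]
  have hlen0 : (vs.take jn).length = jn := by
    rw [List.length_take]; omega
  have h1 : List.filter (fun c => decide ((buildFirstSeen (vs.drop jn) jn
        (buildFirstSeen (vs.take jn) 0 PySem.Dict.empty)).getD c 0 < (jn : Int)))
      (buildFirstSeen (vs.take jn) 0 PySem.Dict.empty).keys
      = (buildFirstSeen (vs.take jn) 0 PySem.Dict.empty).keys := by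
    rw [List.filter_eq_self]
    intro c hc
    obtain ⟨⟨c', w⟩, hmem, hfst⟩ := List.mem_map.mp hc
    subst hfst
    have hmemF : (c', w) ∈ (buildFirstSeen (vs.drop jn) jn
        (buildFirstSeen (vs.take jn) 0 PySem.Dict.empty)).items := by
      rw [ht1]; exact List.mem_append_left _ hmem
    rw [PySem.Dict.getD_of_mem_items _ hmemF hndF]
    have : w < (jn : Int) := by
      have hmem0 : (c', w) ∈ t0 := by
        rw [ht0] at hmem
        rcases List.mem_append.mp hmem with h | h
        · simp [PySem.Dict.empty] at h
        · exact h
      have := hv0 (c', w) hmem0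
      rw [hlen0] at this
      simpa using this.2
    simpa using this
  have h2 : List.filter (fun c => decide ((buildFirstSeen (vs.drop jn) jn
        (buildFirstSeen (vs.take jn) 0 PySem.Dict.empty)).getD c 0 < (jn : Int)))
      (t1.map Prod.fst) = [] := by
    rw [List.filter_eq_nil_iff]
    intro c hc
    obtain ⟨⟨c', w⟩, hmem, hfst⟩ := List.mem_map.mp hc
    subst hfst
    have hmemF : (c', w) ∈ (buildFirstSeen (vs.drop jn) jn
        (buildFirstSeen (vs.take jn) 0 PySem.Dict.empty)).items := by
      rw [ht1]; exact List.mem_append_right _ hmem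
    rw [PySem.Dict.getD_of_mem_items _ hmemF hndF]
    have := (hv1 (c', w) hmem).1
    simp only [decide_eq_true_eq]
    omega
  rw [h1, h2, List.append_nil, hk0, PySem.Dict.keys_empty, PySem.Set.update_nil_left]

-- B's pass 2 over the suffix computes specO of the prefix's seen-set
lemma foldB (l : List (String × List String)) (suffix : List (String × List String))
    (jn : Nat) (acc : List (String × List String))
    (hd : l.drop jn = suffix) (hle : jn ≤ l.length) :
    ((PySem.List.enumerate suffix jn).foldl
      (fun (acc : List (String × List String)) p =>
        if (buildFirstSeen (l.map Prod.snd) 0 PySem.Dict.empty).keys.filter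
            (fun c => decide ((buildFirstSeen (l.map Prod.snd) 0 PySem.Dict.empty).getD c 0 < p.1)
              && PySem.Set.contains (PySem.Set.ofList p.2.2) c) = [] then acc
        else acc ++ [(p.2.1, (buildFirstSeen (l.map Prod.snd) 0 PySem.Dict.empty).keys.filter
            (fun c => decide ((buildFirstSeen (l.map Prod.snd) 0 PySem.Dict.empty).getD c 0 < p.1)
              && PySem.Set.contains (PySem.Set.ofList p.2.2) c))]) acc)
    = acc ++ specO (PySem.Set.ofList (flatCases (l.take jn))) suffix := by
  induction suffix generalizing jn acc with
  | nil => simp [PySem.List.enumerate_nil, specO]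
  | cons p rest ih =>
      have hlt : jn < l.length := by
        have := congrArg List.length hd
        simp [List.length_drop] at this
        omega
      rw [PySem.List.enumerate_cons, List.foldl_cons]
      have hov : (buildFirstSeen (l.map Prod.snd) 0 PySem.Dict.empty).keys.filter
          (fun c => decide ((buildFirstSeen (l.map Prod.snd) 0 PySem.Dict.empty).getD c 0 < (jn : Int))
            && PySem.Set.contains (PySem.Set.ofList p.2) c)
          = PySem.Set.inter (PySem.Set.ofList (flatCases (l.take jn))) (PySem.Set.ofList p.2) := by
        have hcomm : (fun c => decide ((buildFirstSeen (l.map Prod.snd) 0 PySem.Dict.empty).getD c 0 < (jn : Int))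
              && PySem.Set.contains (PySem.Set.ofList p.2) c)
            = (fun c => PySem.Set.contains (PySem.Set.ofList p.2) c
              && decide ((buildFirstSeen (l.map Prod.snd) 0 PySem.Dict.empty).getD c 0 < (jn : Int))) := by
          funext c; exact Bool.and_comm _ _
        rw [hcomm, ← List.filter_filter,
            filter_keys (l.map Prod.snd) jn (by simpa using Nat.le_of_lt hlt)]
        have hfc : flatCases (l.take jn) = ((l.map Prod.snd).take jn).flatten := by
          rw [flatCases, List.map_take]
        rw [hfc]
        rfl
      have htake : l.take (jn + 1) = l.take jn ++ [p] := by
        conv_lhs => rw [← List.take_append_drop jn l, hd]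
        rw [List.take_append]
        have h1 : (l.take jn).length = jn := by rw [List.length_take]; omega
        rw [List.take_of_length_le (by omega), h1]
        simp
      have hseen : PySem.Set.update (PySem.Set.ofList (flatCases (l.take jn))) (PySem.Set.ofList p.2)
          = PySem.Set.ofList (flatCases (l.take (jn + 1))) := by
        rw [update_ofList, htake]
        have : flatCases (l.take jn ++ [p]) = flatCases (l.take jn) ++ p.2 := by
          simp [flatCases]
        rw [this, PySem.Set.ofList_append]
      have hd' : l.drop (jn + 1) = rest := by
        have := congrArg (List.drop 1) hd
        simpa [List.drop_drop] using this
      have hcast : ((jn : Int) + 1) = ((jn + 1 : Nat) : Int) := by push_cast; ring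
      rw [specO]
      simp only [hov]
      rw [hcast]
      split_ifs with h
      · rw [ih (jn + 1) acc hd' (by omega), hseen]
        simp
      · rw [ih (jn + 1) (acc ++ [(p.1, PySem.Set.inter (PySem.Set.ofList (flatCases (l.take jn))) (PySem.Set.ofList p.2))]) hd' (by omega), hseen]
        simp

-- ===== VERDICT (by name: the statement is the Claim_ definition above) =====
theorem verify_no_case_overlap_spec : Claim_equal_verify_no_case_overlap := by
  intro l _
  unfold Spec_verify_no_case_overlap
  obtain ⟨t, ht, hv, hk⟩ := build_items (l.map Prod.snd) 0 PySem.Dict.empty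
    (by simp [PySem.Dict.keys_empty])
  simp only [Nat.cast_zero] at hk
  have hkeys : (buildFirstSeen (l.map Prod.snd) 0 PySem.Dict.empty).keys
      = PySem.Set.ofList (flatCases l) := by
    rw [hk, PySem.Dict.keys_empty, PySem.Set.update_nil_left, flatCases]
  have hA1 := foldA_fst l [] []
  have hA2 := foldA_snd l [] []
  have hB := foldB l l 0 [] (by simp) (by simp)
  simp only [Nat.cast_zero] at hB
  unfold verify_no_case_overlap verify_no_case_overlap_alt
  simp only []
  refine Prod.ext ?_ ?_
  · rw [hA2, hB]
    rfl
  · rw [hA1, PySem.Set.update_nil_left, hkeys, PySem.Set.ofList_ofList]
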